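-- pv_equiv track=rewrite | github.com/TheProgrammer33/Problem_C_MCM | dataAnalyzer.py | getDaysBetweenMonths
-- ===== SOURCE A (Python) =====
-- def getDaysBetweenMonths(startMonth, endMonth, startDay, endDay):
--     days = 0
--
--     if endMonth - startMonth <= 0:
--         for month in range(startMonth, 13):
--             if (month == startMonth):
--                 days += getDaysInMonth(month) - startDay
--             else:
--                 days += getDaysInMonth(month)
--
--         for i in range(1, endMonth):
--             days += getDaysInMonth(i)
--     elif endMonth - startMonth > 0:
--         for month in range(startMonth, endMonth):
--             if (month == startMonth):
--                 days += getDaysInMonth(month) - startDay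
--             else:
--                 days += getDaysInMonth(month)
--
--     days += endDay
--
--     return days
--
-- def getDaysInMonth(month):
--     months = [2, 4, 6, 9, 11]
--     monthsDayCounts = [28, 30, 30, 30, 30]
--
--     if months.count(month) > 0:
--         return monthsDayCounts[months.index(month)]
--     else:
--         return 31
-- ===== SOURCE B (Python) =====
-- def getDaysInMonth(month):
--     months = [2, 4, 6, 9, 11]
--     monthsDayCounts = [28, 30, 30, 30, 30]
--
--     if months.count(month) > 0:
--         return monthsDayCounts[months.index(month)]
--     else:
--         return 31
--
--
-- # days shaved off a 31-day month: February loses 3, the four 30-day months lose 1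
-- _SHORT_MONTHS = ((2, 3), (4, 1), (6, 1), (9, 1), (11, 1))
--
--
-- def _monthSpanDays(a, b):
--     # total length of all months m with a <= m < b, in closed form
--     if a >= b:
--         return 0
--     return 31 * (b - a) - sum(d for m, d in _SHORT_MONTHS if a <= m < b)
--
--
-- def _spanFrom(startMonth, startDay, endMonth):
--     # days from (startMonth, startDay) to the start of endMonth; the day offset
--     # applies only when startMonth itself is part of the span
--     span = _monthSpanDays(startMonth, endMonth)
--     if startMonth < endMonth:
--         span -= startDay
--     return span
--
--
-- def getDaysBetweenMonths(startMonth, endMonth, startDay, endDay):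
--     if endMonth > startMonth:
--         return _spanFrom(startMonth, startDay, endMonth) + endDay
--     # wraparound (or same month): to the end of the year, then into the next year
--     return _spanFrom(startMonth, startDay, 13) + _monthSpanDays(1, endMonth) + endDay
-- ===== Notes on version B (the rewrite author's own statement) =====
-- stated objective: faster
-- what changed: Replaced A's month-by-month summation loops with a closed-form month-span (31 days per month minus the fixed penalties of the five short months inside the range), so each call is O(1) arithmetic instead of a loop over the month range.
import Mathlib
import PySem

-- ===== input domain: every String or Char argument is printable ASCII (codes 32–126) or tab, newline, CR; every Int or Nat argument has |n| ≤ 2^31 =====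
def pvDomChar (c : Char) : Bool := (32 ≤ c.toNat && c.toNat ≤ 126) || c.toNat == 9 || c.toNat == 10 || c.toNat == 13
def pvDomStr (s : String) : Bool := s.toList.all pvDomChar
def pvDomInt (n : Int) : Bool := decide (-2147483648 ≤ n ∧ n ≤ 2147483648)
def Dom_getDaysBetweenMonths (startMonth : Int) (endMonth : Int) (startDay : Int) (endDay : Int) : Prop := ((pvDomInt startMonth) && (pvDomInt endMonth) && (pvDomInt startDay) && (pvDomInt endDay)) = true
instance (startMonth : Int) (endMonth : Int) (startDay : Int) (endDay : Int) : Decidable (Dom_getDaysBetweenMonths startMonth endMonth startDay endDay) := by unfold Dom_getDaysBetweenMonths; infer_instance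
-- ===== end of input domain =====

-- B replaces A's month-by-month loops with a closed-form month-span (31 per month minus the
-- short-month penalties inside the range); objective: faster (O(1) arithmetic vs a loop over months).


-- ===== PORT A =====
-- helper getDaysInMonth, shared by both Pythons (Source B carries the same definition)
def getDaysInMonthP (month : Int) : Int :=
  let months : List Int := [2, 4, 6, 9, 11]
  let monthsDayCounts : List Int := [28, 30, 30, 30, 30]
  if PySem.List.count months month > 0 then
    match PySem.List.index? months month with
    | some i => (PySem.List.pyGet? monthsDayCounts (Int.ofNat i)).getD 31  -- index guaranteed in range by the count guard
    | none => 31  -- unreachable: count > 0 means the value is present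
  else 31

def getDaysBetweenMonths (startMonth : Int) (endMonth : Int) (startDay : Int) (endDay : Int) : Int :=
  let days : Int := 0
  let days : Int :=
    if endMonth - startMonth ≤ 0 then
      let days := (PySem.List.pyRange startMonth 13 1).foldl
        (fun d month => if month == startMonth then d + (getDaysInMonthP month - startDay)
                        else d + getDaysInMonthP month) days
      (PySem.List.pyRange 1 endMonth 1).foldl (fun d i => d + getDaysInMonthP i) days
    else  -- Python's 'elif endMonth - startMonth > 0' is the only remaining case
      (PySem.List.pyRange startMonth endMonth 1).foldl
        (fun d month => if month == startMonth then d + (getDaysInMonthP month - startDay)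
                        else d + getDaysInMonthP month) days
  days + endDay

-- ===== PORT B =====
-- days shaved off a 31-day month: February loses 3, the four 30-day months lose 1
def shortMonths : List (Int × Int) := [(2, 3), (4, 1), (6, 1), (9, 1), (11, 1)]

def monthSpanDays (a : Int) (b : Int) : Int :=
  if a ≥ b then 0
  else  -- the genexp sum over the short months, as a fold
    31 * (b - a) - shortMonths.foldl (fun acc p => if a ≤ p.1 ∧ p.1 < b then acc + p.2 else acc) 0

-- days from (startMonth, startDay) to the start of endMonth; the day offset
-- applies only when startMonth itself is part of the span
def spanFrom (startMonth : Int) (startDay : Int) (endMonth : Int) : Int :=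
  let span := monthSpanDays startMonth endMonth
  if startMonth < endMonth then span - startDay else span

def getDaysBetweenMonths_alt (startMonth : Int) (endMonth : Int) (startDay : Int) (endDay : Int) : Int :=
  if endMonth > startMonth then
    spanFrom startMonth startDay endMonth + endDay
  else
    spanFrom startMonth startDay 13 + monthSpanDays 1 endMonth + endDay

-- ===== PRECONDITION & SPEC =====
def Spec_getDaysBetweenMonths (startMonth : Int) (endMonth : Int) (startDay : Int) (endDay : Int) (out : Int) : Prop := out = getDaysBetweenMonths_alt startMonth endMonth startDay endDay
instance (startMonth : Int) (endMonth : Int) (startDay : Int) (endDay : Int) (out : Int) : Decidable (Spec_getDaysBetweenMonths startMonth endMonth startDay endDay out) := by unfold Spec_getDaysBetweenMonths; infer_instance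

-- ===== CLAIM (what is proved, stated in full; the proofs are below) =====
def Claim_equal_getDaysBetweenMonths : Prop := ∀ (startMonth : Int) (endMonth : Int) (startDay : Int) (endDay : Int), Dom_getDaysBetweenMonths startMonth endMonth startDay endDay → Spec_getDaysBetweenMonths startMonth endMonth startDay endDay (getDaysBetweenMonths startMonth endMonth startDay endDay)

-- ===== LEMMAS AND PROOFS =====

-- the per-month penalty (how much shorter than 31 days month m is)
def pen (m : Int) : Int :=
  if m = 2 then 3 else if m = 4 ∨ m = 6 ∨ m = 9 ∨ m = 11 then 1 else 0

lemma gdim_eq (m : Int) : getDaysInMonthP m = 31 - pen m := by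
  by_cases h2 : m = 2
  · subst h2; decide
  by_cases h4 : m = 4
  · subst h4; decide
  by_cases h6 : m = 6
  · subst h6; decide
  by_cases h9 : m = 9
  · subst h9; decide
  by_cases h11 : m = 11
  · subst h11; decide
  have c2 : ¬((2:Int) = m) := fun h => h2 h.symm
  have c4 : ¬((4:Int) = m) := fun h => h4 h.symm
  have c6 : ¬((6:Int) = m) := fun h => h6 h.symm
  have c9 : ¬((9:Int) = m) := fun h => h9 h.symm
  have c11 : ¬((11:Int) = m) := fun h => h11 h.symm
  simp [getDaysInMonthP, PySem.List.count_eq, c2, c4, c6, c9, c11, pen, h2, h4, h6, h9, h11]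

-- sum of penalties of short months in [a, b), written as independent if-terms
def ES (a b : Int) : Int :=
  (if a ≤ 2 ∧ 2 < b then 3 else 0) + (if a ≤ 4 ∧ 4 < b then 1 else 0) +
  (if a ≤ 6 ∧ 6 < b then 1 else 0) + (if a ≤ 9 ∧ 9 < b then 1 else 0) +
  (if a ≤ 11 ∧ 11 < b then 1 else 0)

lemma foldl_eq_ES (a b : Int) :
    shortMonths.foldl (fun acc p => if a ≤ p.1 ∧ p.1 < b then acc + p.2 else acc) 0 = ES a b := by
  by_cases h2 : a ≤ 2 ∧ 2 < b <;> by_cases h4 : a ≤ 4 ∧ 4 < b <;>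
  by_cases h6 : a ≤ 6 ∧ 6 < b <;> by_cases h9 : a ≤ 9 ∧ 9 < b <;>
  by_cases h11 : a ≤ 11 ∧ 11 < b <;>
  simp [shortMonths, ES, h2, h4, h6, h9, h11]

lemma pen_eq (a : Int) : pen a = (if a = 2 then 3 else 0) + (if a = 4 then 1 else 0) +
    (if a = 6 then 1 else 0) + (if a = 9 then 1 else 0) + (if a = 11 then 1 else 0) := by
  unfold pen; split_ifs <;> omega

-- a month's if-term splits into 'the month is a' plus the tail range's if-term
lemma split_one (m p a b : Int) (hab : a < b) :
    (if a ≤ m ∧ m < b then p else 0) = (if a = m then p else 0) + (if a + 1 ≤ m ∧ m < b then p else 0) := by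
  split_ifs <;> omega

lemma ES_step (a b : Int) (hab : a < b) : ES a b = pen a + ES (a + 1) b := by
  unfold ES
  rw [split_one 2 3 a b hab, split_one 4 1 a b hab, split_one 6 1 a b hab,
      split_one 9 1 a b hab, split_one 11 1 a b hab, pen_eq]
  ring

lemma ES_zero (a b : Int) (h : b ≤ a) : ES a b = 0 := by
  unfold ES; split_ifs <;> omega

-- the closed-form span shrinks by exactly one month length at its left end
lemma span_step (a b : Int) (hab : a < b) :
    monthSpanDays a b = getDaysInMonthP a + monthSpanDays (a + 1) b := by
  rw [gdim_eq]
  unfold monthSpanDays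
  rw [if_neg (by omega : ¬ a ≥ b), foldl_eq_ES]
  by_cases hb : a + 1 ≥ b
  · rw [if_pos hb]
    have := ES_step a b hab
    have := ES_zero (a + 1) b (by omega)
    omega
  · rw [if_neg hb, foldl_eq_ES]
    have := ES_step a b hab
    omega

-- a plain summation loop over range(a, b) equals the closed-form span
lemma sum_plain (a b init : Int) :
    (PySem.List.pyRange a b 1).foldl (fun d i => d + getDaysInMonthP i) init
      = init + monthSpanDays a b := by
  by_cases hab : a < b
  · have hfuel : (b - a).toNat ≠ 0 := by omega
    generalize hn : (b - a).toNat = n at hfuel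
    induction n generalizing a init with
    | zero => omega
    | succ k ih =>
      rw [PySem.List.pyRange_one_cons hab]
      simp only [List.foldl_cons]
      by_cases h2 : a + 1 < b
      · rw [ih (a + 1) _ h2 (by omega) (by omega), span_step a b hab]
        ring
      · have hb' : b = a + 1 := by omega
        subst hb'
        rw [PySem.List.pyRange_one_eq_nil (by omega)]
        have := span_step a (a + 1) hab
        have hz : monthSpanDays (a + 1) (a + 1) = 0 := by
          simp [monthSpanDays]
        simp only [List.foldl_nil]
        omega
  · rw [PySem.List.pyRange_one_eq_nil (by omega)]
    simp only [List.foldl_nil, monthSpanDays, if_pos (by omega : a ≥ b)]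
    ring
-- after the first month, the 'month == startMonth' branch never fires
lemma sum_if_tail (s sd : Int) (a b init : Int) (hsa : s < a) :
    (PySem.List.pyRange a b 1).foldl
      (fun d month => if month = s then d + (getDaysInMonthP month - sd)
                      else d + getDaysInMonthP month) init
      = (PySem.List.pyRange a b 1).foldl (fun d i => d + getDaysInMonthP i) init := by
  by_cases hab : a < b
  · generalize hn : (b - a).toNat = n
    induction n generalizing a init with
    | zero => omega
    | succ k ih =>
      rw [PySem.List.pyRange_one_cons hab]
      simp only [List.foldl_cons, if_neg (show ¬ a = s by omega)]
      by_cases h2 : a + 1 < b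
      · exact ih (a + 1) _ (by omega) h2 (by omega)
      · rw [PySem.List.pyRange_one_eq_nil (by omega)]; rfl
  · rw [PySem.List.pyRange_one_eq_nil (by omega)]; rfl

-- the full start loop: it subtracts sd exactly when the range is nonempty
lemma sum_start (s sd b init : Int) :
    (PySem.List.pyRange s b 1).foldl
      (fun d month => if month = s then d + (getDaysInMonthP month - sd)
                      else d + getDaysInMonthP month) init
      = init + monthSpanDays s b - (if s < b then sd else 0) := by
  by_cases hsb : s < b
  · rw [PySem.List.pyRange_one_cons hsb]
    simp only [List.foldl_cons, if_true]
    rw [sum_if_tail s sd (s + 1) b _ (by omega), sum_plain (s + 1) b]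
    rw [span_step s b hsb]
    simp only [if_pos hsb]
    ring
  · rw [PySem.List.pyRange_one_eq_nil (by omega)]
    simp only [List.foldl_nil, monthSpanDays, if_pos (by omega : s ≥ b), if_neg hsb]
    ring

-- ===== VERDICT (by name: the statement is the Claim_ definition above) =====
theorem getDaysBetweenMonths_spec : Claim_equal_getDaysBetweenMonths := by
  intro s e sd ed _
  unfold Spec_getDaysBetweenMonths getDaysBetweenMonths getDaysBetweenMonths_alt spanFrom
  simp only [beq_iff_eq]
  by_cases h : e - s ≤ 0
  · simp only [if_pos h, if_neg (by omega : ¬ e > s)]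
    rw [sum_start s sd 13 0, sum_plain 1 e]
    by_cases hs13 : s < 13
    · simp only [if_pos hs13]; ring
    · simp only [if_neg hs13]; ring
  · simp only [if_neg h, if_pos (by omega : e > s)]
    rw [sum_start s sd e 0]
    simp only [if_pos (by omega : s < e)]
    ring
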